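-- pv_equiv track=rewrite | github.com/jsshim24/school-work | Intro to Programming/Assignments/Assignment 6/ShimJunSeob_assign6_part2b.py | number_2
-- ===== SOURCE A (Python) =====
-- def horizontal_line(width,char):
--     line = char*width
--     return line
--
-- def number_2(width,char):
--     pattern = ""
--     for i in range(5):
--         if i%2 == 0:
--             pattern += horizontal_line(width,char) + "\n"
--         elif i == 1:
--             pattern += " "*(width-1) + char + "\n"
--         else:
--             pattern += char + "\n"
--     return pattern
-- ===== SOURCE B (Python) =====
-- def number_2(width, char):
--     # Interpret a shape template: each symbol expands to a segment of the drawing.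
--     expand = {
--         "F": char * width,            # full horizontal line
--         "R": " " * (width - 1) + char,  # right-aligned single char
--         "C": char,                    # single char at the left
--         "\n": "\n",
--     }
--     return "".join(expand[t] for t in "F\nR\nF\nC\nF\n")
-- ===== Notes on version B (the rewrite author's own statement) =====
-- stated objective: alternative
-- what changed: Replaced the range(5) loop with parity/index dispatch by a template interpreter: a fixed shape string 'F\nR\nF\nC\nF\n' is expanded symbol-by-symbol through a dict mapping each symbol to its segment.
import Mathlib
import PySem

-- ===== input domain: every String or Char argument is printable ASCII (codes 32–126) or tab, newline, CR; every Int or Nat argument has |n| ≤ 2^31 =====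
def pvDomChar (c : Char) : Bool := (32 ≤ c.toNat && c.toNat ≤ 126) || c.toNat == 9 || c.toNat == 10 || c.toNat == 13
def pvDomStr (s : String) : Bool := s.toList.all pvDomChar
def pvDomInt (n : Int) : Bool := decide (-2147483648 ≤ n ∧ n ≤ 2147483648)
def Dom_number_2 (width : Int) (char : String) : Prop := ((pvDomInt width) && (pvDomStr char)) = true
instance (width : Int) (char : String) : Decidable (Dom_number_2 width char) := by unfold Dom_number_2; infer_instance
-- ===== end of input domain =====

-- B replaces A's range(5) loop and parity/index dispatch by interpreting a fixed shape template through a symbol->segment dict ("alternative"); same return value for all inputs.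


-- ===== PORT A =====
-- pattern is accumulated as List Char (Python str concatenation), wrapped in String.ofList at return.
def horizontal_line (width : Int) (char : String) : String :=
  String.ofList (PySem.List.pyRepeat char.toList width)

def number_2 (width : Int) (char : String) : String :=
  let pattern : List Char :=
    (PySem.List.pyRange 0 5 1).foldl (fun pattern i =>
      if PySem.Int.mod i 2 == 0 then
        pattern ++ (horizontal_line width char).toList ++ ['\n']
      else if i == 1 then
        pattern ++ PySem.List.pyRepeat [' '] (width - 1) ++ char.toList ++ ['\n']
      else
        pattern ++ char.toList ++ ['\n']) []
  String.ofList pattern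

-- ===== PORT B =====
-- template interpreter: expand each symbol of "F\nR\nF\nC\nF\n" via the dict; "".join = flatMap.
def number_2_alt (width : Int) (char : String) : String :=
  let expand : PySem.Dict String (List Char) :=
    PySem.Dict.ofList
      [("F", PySem.List.pyRepeat char.toList width),
       ("R", PySem.List.pyRepeat [' '] (width - 1) ++ char.toList),
       ("C", char.toList),
       ("\n", ['\n'])]
  String.ofList (("F\nR\nF\nC\nF\n".toList).flatMap
    (fun t => (expand.get? (String.ofList [t])).getD []))

-- ===== PRECONDITION & SPEC =====
def Spec_number_2 (width : Int) (char : String) (out : String) : Prop := out = number_2_alt width char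
instance (width : Int) (char : String) (out : String) : Decidable (Spec_number_2 width char out) := by unfold Spec_number_2; infer_instance

-- ===== CLAIM (what is proved, stated in full; the proofs are below) =====
def Claim_equal_number_2 : Prop := ∀ (width : Int) (char : String), Dom_number_2 width char → Spec_number_2 width char (number_2 width char)

-- ===== LEMMAS AND PROOFS =====

-- ===== VERDICT (by name: the statement is the Claim_ definition above) =====
theorem number_2_spec : Claim_equal_number_2 := by
  intro width char _
  unfold Spec_number_2 number_2 number_2_alt horizontal_line
  simp [PySem.List.pyRange, PySem.Int.mod, PySem.Dict.ofList, PySem.Dict.update,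
        PySem.Dict.get?_insert, PySem.Dict.get?_empty, List.flatMap,
        List.range_succ, List.append_assoc, Int.fmod, String.ext_iff]
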